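-- pv_equiv track=rewrite | github.com/aleksanderZak7/SPOJ | Python/Odleglosc_w_wyrazach.py | letter_difference
-- ===== SOURCE A (Python) =====
-- ALPHABET = "ABCDEFGHIJKLMNOPQRSTUVWXYZ"
--
-- def letter_difference(word):
--     max_index = 0
--     min_index = len(ALPHABET) - 1
--     for letter in word:
--         current_index = ALPHABET.index(letter)
--         if current_index > max_index:
--             max_index = current_index
--         if current_index < min_index:
--             min_index = current_index
--     return max_index - min_index
-- ===== SOURCE B (Python) =====
-- ALPHABET = "ABCDEFGHIJKLMNOPQRSTUVWXYZ"
--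
-- def letter_difference(word):
--     # Bucket/presence approach: mark which alphabet positions occur,
--     # then recover max/min by scanning the fixed 26 positions, not the word.
--     seen = [False] * len(ALPHABET)
--     for letter in word:
--         seen[ALPHABET.index(letter)] = True
--     max_index = next((i for i in range(25, -1, -1) if seen[i]), 0)
--     min_index = next((i for i in range(26) if seen[i]), 25)
--     return max_index - min_index
-- ===== Notes on version B (the rewrite author's own statement) =====
-- stated objective: alternative
-- what changed: replaces A's running min/max tracking over the word with a bucket algorithm: one pass marks a 26-slot presence array, then max/min are recovered by scanning the fixed alphabet positions (descending for max, ascending for min) instead of reducing over the word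
import Mathlib
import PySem

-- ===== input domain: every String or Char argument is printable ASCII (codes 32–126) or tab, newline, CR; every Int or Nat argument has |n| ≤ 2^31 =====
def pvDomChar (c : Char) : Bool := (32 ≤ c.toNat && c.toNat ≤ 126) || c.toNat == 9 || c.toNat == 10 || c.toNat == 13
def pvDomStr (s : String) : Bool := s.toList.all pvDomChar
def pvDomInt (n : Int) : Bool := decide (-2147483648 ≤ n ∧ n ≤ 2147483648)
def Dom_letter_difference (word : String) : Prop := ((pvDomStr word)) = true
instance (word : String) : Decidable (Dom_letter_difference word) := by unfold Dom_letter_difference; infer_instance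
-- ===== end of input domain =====

-- B replaces A's running min/max tracking over the word with a bucket algorithm:
-- mark a 26-slot presence array, then scan the fixed alphabet positions for max/min.

-- shared helper: ALPHABET.index(letter). Exact inside Pre_ (letter present in ALPHABET);
-- outside Pre_ Python raises ValueError (index? = none), so the .getD 0 default is never claimed.
def pvAlphabet : List Char := ['A','B','C','D','E','F','G','H','I','J','K','L','M','N','O','P','Q','R','S','T','U','V','W','X','Y','Z']

def pvAlphaIdxNat (c : Char) : Nat := (PySem.List.index? pvAlphabet c).getD 0

def pvAlphaIdx (c : Char) : Int := (pvAlphaIdxNat c : Int)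

-- ===== PORT A =====
def letter_difference (word : String) : Int :=
  let r := word.toList.foldl (fun (st : Int × Int) letter =>
    let current := pvAlphaIdx letter
    let st1 := if current > st.1 then (current, st.2) else st
    if current < st1.2 then (st1.1, current) else st1) (0, 25)
  r.1 - r.2

-- ===== PORT B =====
def letter_difference_alt (word : String) : Int :=
  let seen := word.toList.foldl
    (fun (s : List Bool) letter => s.set (pvAlphaIdxNat letter) true)
    (List.replicate 26 false)
  let max_index := ((PySem.List.pyRange 25 (-1) (-1)).find?
    (fun i => seen.getD i.toNat false)).getD 0
  let min_index := ((PySem.List.pyRange 0 26 1).find?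
    (fun i => seen.getD i.toNat false)).getD 25
  max_index - min_index

-- ===== PRECONDITION & SPEC =====
-- Pre_ excludes words containing a character that is not an uppercase ALPHABET letter:
-- there Python A (and B alike) raises ValueError from ALPHABET.index.
def Pre_letter_difference (word : String) : Prop := (word.toList.all (fun c => pvAlphabet.contains c)) = true
instance (word : String) : Decidable (Pre_letter_difference word) := by unfold Pre_letter_difference; infer_instance
def pvWitness_letter_difference : String := "HELLO"

def Spec_letter_difference (word : String) (out : Int) : Prop := out = letter_difference_alt word
instance (word : String) (out : Int) : Decidable (Spec_letter_difference word out) := by unfold Spec_letter_difference; infer_instance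

-- ===== CLAIM (what is proved, stated in full; the proofs are below) =====
def Claim_equal_letter_difference : Prop := ∀ (word : String), Dom_letter_difference word → Pre_letter_difference word → Spec_letter_difference word (letter_difference word)

-- ===== LEMMAS AND PROOFS =====

lemma pvAlphaIdxNat_lt (c : Char) : pvAlphaIdxNat c < 26 := by
  unfold pvAlphaIdxNat
  by_cases hc : c ∈ pvAlphabet
  · fin_cases hc <;> decide
  · rw [(PySem.List.index?_eq_none_iff pvAlphabet c).mpr hc]; decide

-- A's fold splits into an independent running max and running min
lemma foldA_pair (l : List Char) (a b : Int) :
    l.foldl (fun (st : Int × Int) letter =>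
      let current := pvAlphaIdx letter
      let st1 := if current > st.1 then (current, st.2) else st
      if current < st1.2 then (st1.1, current) else st1) (a, b)
    = (l.foldl (fun m c => max m (pvAlphaIdx c)) a,
       l.foldl (fun m c => min m (pvAlphaIdx c)) b) := by
  induction l generalizing a b with
  | nil => rfl
  | cons c t ih =>
      simp only [List.foldl_cons]
      rw [← ih]
      congr 1
      simp only [max_def, min_def]
      split_ifs <;> simp_all <;> omega

-- the presence array: entry i is true iff some letter of the word has index i
lemma seen_getD (l : List Char) (s : List Bool) (hs : s.length = 26) (i : Nat) (hi : i < 26) :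
    (l.foldl (fun (s : List Bool) letter => s.set (pvAlphaIdxNat letter) true) s).getD i false
      = (s.getD i false || l.any (fun c => pvAlphaIdxNat c == i)) := by
  induction l generalizing s with
  | nil => simp
  | cons c t ih =>
      simp only [List.foldl_cons, List.any_cons]
      rw [ih _ (by simp [hs])]
      have hci := pvAlphaIdxNat_lt c
      by_cases h : pvAlphaIdxNat c = i
      · subst h
        simp [List.getD, List.getElem?_set_self (by omega : pvAlphaIdxNat c < s.length)]
      · simp only [List.getD, List.getElem?_set_ne h]
        have hb : (pvAlphaIdxNat c == i) = false := beq_eq_false_iff_ne.mpr h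
        cases s[i]? <;> simp [hb]

-- in a strictly descending list, find? returns the greatest satisfying element
lemma find?_desc_max (l : List Int) (p : Int → Bool) (hl : l.Pairwise (· > ·)) (m : Int)
    (h : l.find? p = some m) : ∀ j ∈ l, p j = true → j ≤ m := by
  induction l with
  | nil => simp at h
  | cons a t ih =>
      rw [List.pairwise_cons] at hl
      rw [List.find?_cons] at h
      by_cases hp : p a
      · simp [hp] at h
        subst h
        intro j hj _
        rcases List.mem_cons.mp hj with rfl | hj
        · exact le_refl _
        · exact le_of_lt (hl.1 j hj)
      · simp [hp] at h
        intro j hj hpj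
        rcases List.mem_cons.mp hj with rfl | hj
        · simp [hpj] at hp
        · exact ih hl.2 h j hj hpj

-- in a strictly ascending list, find? returns the least satisfying element
lemma find?_asc_min (l : List Int) (p : Int → Bool) (hl : l.Pairwise (· < ·)) (m : Int)
    (h : l.find? p = some m) : ∀ j ∈ l, p j = true → m ≤ j := by
  induction l with
  | nil => simp at h
  | cons a t ih =>
      rw [List.pairwise_cons] at hl
      rw [List.find?_cons] at h
      by_cases hp : p a
      · simp [hp] at h
        subst h
        intro j hj _
        rcases List.mem_cons.mp hj with rfl | hj
        · exact le_refl _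
        · exact le_of_lt (hl.1 j hj)
      · simp [hp] at h
        intro j hj hpj
        rcases List.mem_cons.mp hj with rfl | hj
        · simp [hpj] at hp
        · exact ih hl.2 h j hj hpj

lemma foldl_max_bounds (l : List Int) (a : Int) :
    a ≤ l.foldl max a ∧ (∀ x ∈ l, x ≤ l.foldl max a) ∧ (l.foldl max a = a ∨ l.foldl max a ∈ l) := by
  induction l generalizing a with
  | nil => simp
  | cons x t ih =>
      obtain ⟨h1, h2, h3⟩ := ih (max a x)
      refine ⟨le_trans (le_max_left _ _) h1, ?_, ?_⟩
      · intro y hy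
        rcases List.mem_cons.mp hy with rfl | hy
        · exact le_trans (le_max_right _ _) h1
        · exact h2 y hy
      · rcases h3 with h | h
        · rcases max_choice a x with hm | hm <;> rw [List.foldl_cons, h, hm]
          · exact Or.inl rfl
          · exact Or.inr List.mem_cons_self
        · exact Or.inr (List.mem_cons_of_mem _ h)

lemma foldl_min_bounds (l : List Int) (a : Int) :
    l.foldl min a ≤ a ∧ (∀ x ∈ l, l.foldl min a ≤ x) ∧ (l.foldl min a = a ∨ l.foldl min a ∈ l) := by
  induction l generalizing a with
  | nil => simp
  | cons x t ih =>
      obtain ⟨h1, h2, h3⟩ := ih (min a x)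
      refine ⟨le_trans h1 (min_le_left _ _), ?_, ?_⟩
      · intro y hy
        rcases List.mem_cons.mp hy with rfl | hy
        · exact le_trans h1 (min_le_right _ _)
        · exact h2 y hy
      · rcases h3 with h | h
        · rcases min_choice a x with hm | hm <;> rw [List.foldl_cons, h, hm]
          · exact Or.inl rfl
          · exact Or.inr List.mem_cons_self
        · exact Or.inr (List.mem_cons_of_mem _ h)

lemma pyRange_desc : PySem.List.pyRange 25 (-1) (-1)
    = [25,24,23,22,21,20,19,18,17,16,15,14,13,12,11,10,9,8,7,6,5,4,3,2,1,0] := by decide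

lemma pyRange_asc : PySem.List.pyRange 0 26 1
    = [0,1,2,3,4,5,6,7,8,9,10,11,12,13,14,15,16,17,18,19,20,21,22,23,24,25] := by decide

lemma mem_desc (j : Int) : j ∈ PySem.List.pyRange 25 (-1) (-1) ↔ 0 ≤ j ∧ j ≤ 25 := by
  rw [pyRange_desc]; constructor
  · intro h; fin_cases h <;> omega
  · intro hj
    simp only [List.mem_cons, List.not_mem_nil, or_false]
    omega

lemma mem_asc (j : Int) : j ∈ PySem.List.pyRange 0 26 1 ↔ 0 ≤ j ∧ j ≤ 25 := by
  rw [pyRange_asc]; constructor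
  · intro h; fin_cases h <;> omega
  · intro hj
    simp only [List.mem_cons, List.not_mem_nil, or_false]
    omega

theorem letter_difference_spec : Claim_equal_letter_difference := by
  intro word _ hpre
  unfold Spec_letter_difference letter_difference letter_difference_alt
  simp only [foldA_pair]
  rw [← List.foldl_map (f := pvAlphaIdx) (g := max), ← List.foldl_map (f := pvAlphaIdx) (g := min)]
  set idxs := word.toList.map pvAlphaIdx with hidxs
  set p : Int → Bool := fun i =>
    (word.toList.foldl (fun (s : List Bool) letter => s.set (pvAlphaIdxNat letter) true)
      (List.replicate 26 false)).getD i.toNat false with hp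
  have hseen : ∀ (i : Int), 0 ≤ i → i ≤ 25 → (p i = true ↔ i ∈ idxs) := by
    intro i h0 h25
    have hlt : i.toNat < 26 := by omega
    rw [hp]
    simp only []
    rw [seen_getD _ _ (by simp) _ hlt]
    simp only [List.getD, List.getElem?_replicate, if_pos hlt, Option.getD_some,
      Bool.false_or, List.any_eq_true, beq_iff_eq, hidxs, List.mem_map]
    constructor
    · rintro ⟨c, hc, hidx⟩
      exact ⟨c, hc, by unfold pvAlphaIdx; omega⟩
    · rintro ⟨c, hc, hidx⟩
      refine ⟨c, hc, ?_⟩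
      unfold pvAlphaIdx at hidx; omega
  have hdesc_pw : (PySem.List.pyRange 25 (-1) (-1)).Pairwise (· > ·) := by
    rw [pyRange_desc]; decide
  have hasc_pw : (PySem.List.pyRange 0 26 1).Pairwise (· < ·) := by
    rw [pyRange_asc]; decide
  have hbnd : ∀ x ∈ idxs, 0 ≤ x ∧ x ≤ 25 := by
    rintro x hx
    obtain ⟨c, _, rfl⟩ := List.mem_map.mp hx
    have := pvAlphaIdxNat_lt c
    unfold pvAlphaIdx; omega
  by_cases hw : word.toList = []
  · -- empty word: presence array stays all-false, both find? fail, defaults 0 and 25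
    have hidn : idxs = [] := by rw [hidxs, hw]; rfl
    have hnone : ∀ l : List Int, l.find? p = none := by
      intro l
      rw [List.find?_eq_none]
      intro j _
      simp only [hp, hw, List.foldl_nil, List.getD, List.getElem?_replicate]
      split_ifs <;> simp
    rw [hnone, hnone, hidn]
    rfl
  · obtain ⟨c, t, hw2⟩ := List.exists_cons_of_ne_nil hw
    have hcmem : pvAlphaIdx c ∈ idxs := by
      rw [hidxs, hw2]; exact List.mem_cons_self
    -- max side
    obtain ⟨hM0, hMub, hMcase⟩ := foldl_max_bounds idxs 0
    have hMmem : idxs.foldl max 0 ∈ idxs := by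
      rcases hMcase with h | h
      · have h1 := hMub _ hcmem
        have h2 := (hbnd _ hcmem).1
        have : pvAlphaIdx c = idxs.foldl max 0 := by omega
        rwa [← this]
      · exact h
    have hMb := hbnd _ hMmem
    have hpM : p (idxs.foldl max 0) = true := (hseen _ hMb.1 hMb.2).mpr hMmem
    have hfindmax : (PySem.List.pyRange 25 (-1) (-1)).find? p = some (idxs.foldl max 0) := by
      cases hf : (PySem.List.pyRange 25 (-1) (-1)).find? p with
      | none =>
          have := List.find?_eq_none.mp hf _ ((mem_desc _).mpr hMb)
          simp [hpM] at this
      | some m =>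
          have hpm : p m = true := List.find?_some hf
          have hmb := (mem_desc m).mp (List.mem_of_find?_eq_some hf)
          have h1 : idxs.foldl max 0 ≤ m :=
            find?_desc_max _ p hdesc_pw m hf _ ((mem_desc _).mpr hMb) hpM
          have h2 : m ≤ idxs.foldl max 0 := hMub m ((hseen m hmb.1 hmb.2).mp hpm)
          rw [le_antisymm h2 h1]
    -- min side
    obtain ⟨hm25, hmlb, hmcase⟩ := foldl_min_bounds idxs 25
    have hmmem : idxs.foldl min 25 ∈ idxs := by
      rcases hmcase with h | h
      · have h1 := hmlb _ hcmem
        have h2 := (hbnd _ hcmem).2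
        have : pvAlphaIdx c = idxs.foldl min 25 := by omega
        rwa [← this]
      · exact h
    have hmb := hbnd _ hmmem
    have hpm : p (idxs.foldl min 25) = true := (hseen _ hmb.1 hmb.2).mpr hmmem
    have hfindmin : (PySem.List.pyRange 0 26 1).find? p = some (idxs.foldl min 25) := by
      cases hf : (PySem.List.pyRange 0 26 1).find? p with
      | none =>
          have := List.find?_eq_none.mp hf _ ((mem_asc _).mpr hmb)
          simp [hpm] at this
      | some m =>
          have hpm' : p m = true := List.find?_some hf
          have hmb' := (mem_asc m).mp (List.mem_of_find?_eq_some hf)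
          have h1 : idxs.foldl min 25 ≤ m := hmlb m ((hseen m hmb'.1 hmb'.2).mp hpm')
          have h2 : m ≤ idxs.foldl min 25 :=
            find?_asc_min _ p hasc_pw m hf _ ((mem_asc _).mpr hmb) hpm
          rw [le_antisymm h2 h1]
    rw [hfindmax, hfindmin]
    rfl
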